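-- pv_equiv track=rewrite | github.com/mosh3eb/merlin | tests/algorithms/test_amplitude_encoding.py | _fock_keys
-- ===== SOURCE A (Python) =====
-- def _fock_keys(modes: int, n_photons: int) -> set[tuple[int, ...]]:
--     keys: set[tuple[int, ...]] = set()
--
--     def build(prefix: list[int], remaining: int, idx: int) -> None:
--         if idx == modes - 1:
--             keys.add(tuple(prefix + [remaining]))
--             return
--         for value in range(remaining + 1):
--             build(prefix + [value], remaining - value, idx + 1)
--
--     build([], n_photons, 0)
--     return keys
-- ===== SOURCE B (Python) =====
-- def _fock_keys(modes: int, n_photons: int) -> set[tuple[int, ...]]: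
--     # Level-by-level stars-and-bars: grow all prefixes one mode at a time
--     # (stopping once no prefix survives), then close each with the leftover photons.
--     prefixes = [()]
--     m = modes - 1
--     while m > 0 and prefixes:
--         prefixes = [p + (v,) for p in prefixes for v in range(n_photons - sum(p) + 1)]
--         m -= 1
--     return {p + (n_photons - sum(p),) for p in prefixes}
-- ===== Notes on version B (the rewrite author's own statement) =====
-- stated objective: simpler
-- what changed: Replaced the nested recursive DFS callback mutating a set by a flat level-by-level comprehension loop (stopping once no prefix survives) that grows all prefixes one mode at a time and then closes each with the leftover photons.
-- outside the precondition, e.g. on _fock_keys(0, -1): A returns set(), B returns {(-1,)}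
import Mathlib
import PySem

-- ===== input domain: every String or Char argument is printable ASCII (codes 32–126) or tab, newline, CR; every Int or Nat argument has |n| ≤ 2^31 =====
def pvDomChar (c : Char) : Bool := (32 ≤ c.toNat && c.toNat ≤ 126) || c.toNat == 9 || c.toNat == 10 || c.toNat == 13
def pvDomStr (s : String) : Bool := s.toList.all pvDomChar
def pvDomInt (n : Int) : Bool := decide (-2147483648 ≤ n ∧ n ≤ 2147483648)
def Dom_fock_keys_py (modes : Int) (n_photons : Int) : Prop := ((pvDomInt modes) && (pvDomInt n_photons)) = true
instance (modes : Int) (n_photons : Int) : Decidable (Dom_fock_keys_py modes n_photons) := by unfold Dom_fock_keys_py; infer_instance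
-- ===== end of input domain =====

-- B replaces A's recursive DFS callback by a flat level-by-level comprehension (simpler, no recursion);
-- return-value equivalence is proved for modes ≥ 1 (for modes ≤ 0 A recurses unboundedly or returns an accidental empty set).

-- ===== PORT A =====
-- Python's nested `build` mutates the set `keys`; ported as a state-passing recursion.
-- `fuel` only bounds the recursion depth (modes - 1 - idx steps suffice inside Pre_); Python's recursion is unbounded for modes ≤ 0.
def buildA (modes : Int) : Nat → List Int → Int → Int → PySem.Set (List Int) → PySem.Set (List Int)
  | fuel, pre, remaining, idx, keys =>
    if idx = modes - 1 then PySem.Set.add keys (pre ++ [remaining])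
    else
      match fuel with
      | 0 => keys
      | f + 1 =>
        (PySem.List.pyRange 0 (remaining + 1) 1).foldl
          (fun ks v => buildA modes f (pre ++ [v]) (remaining - v) (idx + 1) ks) keys

def fock_keys_py (modes : Int) (n_photons : Int) : List (List Int) :=
  buildA modes (modes - 1).toNat [] n_photons 0 PySem.Set.empty

-- ===== PORT B =====
-- one level of `[p + (v,) for p in prefixes for v in range(n_photons - sum(p) + 1)]`
def extendLevel (n_photons : Int) (prefixes : List (List Int)) : List (List Int) :=
  prefixes.flatMap (fun p => (PySem.List.pyRange 0 (n_photons - p.sum + 1) 1).map (fun v => p ++ [v]))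

-- the `while m > 0 and prefixes:` loop (m starts at modes - 1 and is decremented by 1, so m.toNat counts the iterations left)
def levelLoop (n_photons : Int) : Nat → List (List Int) → List (List Int)
  | 0, prefixes => prefixes
  | m + 1, prefixes => if prefixes = [] then prefixes else levelLoop n_photons m (extendLevel n_photons prefixes)

def fock_keys_py_alt (modes : Int) (n_photons : Int) : List (List Int) :=
  PySem.Set.ofList ((levelLoop n_photons (modes - 1).toNat [[]]).map (fun p => p ++ [n_photons - p.sum]))

-- ===== PRECONDITION & SPEC =====
-- Pre_ excludes modes ≤ 0, outside the function's natural domain: there A recurses without bound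
-- (RecursionError for n_photons ≥ 0) and for n_photons < 0 returns an accidental empty set.
def Pre_fock_keys_py (modes : Int) (n_photons : Int) : Prop := 1 ≤ modes
instance (modes : Int) (n_photons : Int) : Decidable (Pre_fock_keys_py modes n_photons) := by unfold Pre_fock_keys_py; infer_instance
def pvWitness_fock_keys_py : Int × Int := (3, 2)

def Spec_fock_keys_py (modes : Int) (n_photons : Int) (out : List (List Int)) : Prop := out = fock_keys_py_alt modes n_photons
instance (modes : Int) (n_photons : Int) (out : List (List Int)) : Decidable (Spec_fock_keys_py modes n_photons out) := by unfold Spec_fock_keys_py; infer_instance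

-- ===== CLAIM (what is proved, stated in full; the proofs are below) =====
def Claim_equal_fock_keys_py : Prop := ∀ (modes : Int) (n_photons : Int), Dom_fock_keys_py modes n_photons → Pre_fock_keys_py modes n_photons → Spec_fock_keys_py modes n_photons (fock_keys_py modes n_photons)
-- ===== LEMMAS AND PROOFS =====

-- the list of compositions (prefix p, r photons left, f more dividers) in A's emission order
def emitA : Nat → List Int → Int → List (List Int)
  | 0, p, r => [p ++ [r]]
  | f + 1, p, r => (PySem.List.pyRange 0 (r + 1) 1).flatMap (fun v => emitA f (p ++ [v]) (r - v))

lemma foldl_foldl_flatMap {α β γ : Type} (h : γ → β → γ) (g : α → List β) (l : List α) (init : γ) :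
    l.foldl (fun acc v => (g v).foldl h acc) init = (l.flatMap g).foldl h init := by
  induction l generalizing init with
  | nil => rfl
  | cons x xs ih => simp [List.foldl_append, ih]

lemma buildA_eq (f : Nat) : ∀ (modes : Int) (p : List Int) (r : Int) (keys : PySem.Set (List Int)),
    buildA modes f p r (modes - 1 - (f : Int)) keys = (emitA f p r).foldl PySem.Set.add keys := by
  induction f with
  | zero => intro modes p r keys; simp [buildA, emitA]
  | succ f ih =>
    intro modes p r keys
    have hne : modes - 1 - ((f + 1 : Nat) : Int) ≠ modes - 1 := by push_cast; omega
    rw [buildA, if_neg hne]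
    have hfun : (fun ks v => buildA modes f (p ++ [v]) (r - v) (modes - 1 - ((f + 1 : Nat) : Int) + 1) ks)
        = fun (ks : PySem.Set (List Int)) v => (emitA f (p ++ [v]) (r - v)).foldl PySem.Set.add ks := by
      funext ks v
      have : modes - 1 - ((f + 1 : Nat) : Int) + 1 = modes - 1 - (f : Int) := by push_cast; ring
      rw [this, ih]
    rw [hfun, foldl_foldl_flatMap]
    rfl

lemma iterate_singleton (n : Int) (f : Nat) : ∀ xs : List (List Int),
    (extendLevel n)^[f] xs = xs.flatMap (fun p => (extendLevel n)^[f] [p]) := by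
  induction f with
  | zero => intro xs; simp
  | succ f ih =>
    intro xs
    simp only [Function.iterate_succ_apply]
    rw [show extendLevel n xs = xs.flatMap (fun p => extendLevel n [p]) by
      simp [extendLevel]]
    rw [ih, List.flatMap_assoc]
    refine List.flatMap_congr (fun p _ => ?_)
    rw [← ih]

lemma levels_eq (n : Int) (f : Nat) : ∀ p : List Int,
    ((extendLevel n)^[f] [p]).map (fun q => q ++ [n - q.sum]) = emitA f p (n - p.sum) := by
  induction f with
  | zero => intro p; simp [emitA]
  | succ f ih =>
    intro p
    rw [Function.iterate_succ_apply]
    rw [show extendLevel n [p] = (PySem.List.pyRange 0 (n - p.sum + 1) 1).map (fun v => p ++ [v]) by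
      simp [extendLevel]]
    rw [iterate_singleton, List.flatMap_map, List.map_flatMap]
    rw [emitA]
    refine List.flatMap_congr (fun v _ => ?_)
    rw [ih]
    congr 1
    simp
    ring

lemma iterate_extend_nil (n : Int) (m : Nat) : (extendLevel n)^[m] [] = [] := by
  induction m with
  | zero => rfl
  | succ m ih => rw [Function.iterate_succ_apply]; exact ih

lemma levelLoop_eq_iterate (n : Int) (m : Nat) : ∀ ps, levelLoop n m ps = (extendLevel n)^[m] ps := by
  induction m with
  | zero => intro ps; rfl
  | succ m ih =>
    intro ps
    rw [levelLoop]
    by_cases h : ps = []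
    · rw [if_pos h, h, iterate_extend_nil]
    · rw [if_neg h, ih, Function.iterate_succ_apply]

theorem fock_keys_py_spec : Claim_equal_fock_keys_py := by
  intro modes n _ hpre
  unfold Spec_fock_keys_py fock_keys_py fock_keys_py_alt
  have h1 : modes - 1 = ((modes - 1).toNat : Int) := by
    unfold Pre_fock_keys_py at hpre; omega
  have hz : (0 : Int) = modes - 1 - ((modes - 1).toNat : Int) := by omega
  have hb := buildA_eq (modes - 1).toNat modes [] n PySem.Set.empty
  rw [← hz] at hb
  rw [hb]
  rw [levelLoop_eq_iterate]
  have := levels_eq n ((modes - 1).toNat) []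
  simp only [List.sum_nil, sub_zero] at this
  simp only [this, PySem.Set.ofList_eq_foldl]
  rfl
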